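-- pv_equiv track=rewrite | github.com/heyyousa/django-cxyybbs | bbsapp/views.py | maskip
-- ===== SOURCE A (Python) =====
-- def maskip(userip):
--     a = []
--
--     for i in range(len(userip)):
--         a.append(userip[i])
--
--     b = ''
--     num = 0
--     for j in range(len(userip)):
--         if a[j] == '.':
--             num += 1
--         if num != 2:
--             b += a[j]
--         elif num == 2:
--             if a[j] == '.':
--                 b += a[j]
--                 for n in range(3):
--                     b += '*'
--     return b
-- ===== SOURCE B (Python) =====
-- def maskip(userip):
--     parts = userip.split('.')
--     if len(parts) >= 3:
--         parts[2] = '***'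
--     return '.'.join(parts)
-- ===== Notes on version B (the rewrite author's own statement) =====
-- stated objective: simpler
-- what changed: Replaces A's character-by-character scan that counts separator dots while rebuilding the string with a token-level split on the dot, assignment of the mask to the third token, and a join back; masking is by token position instead of by dot-counting character state.
import Mathlib
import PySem

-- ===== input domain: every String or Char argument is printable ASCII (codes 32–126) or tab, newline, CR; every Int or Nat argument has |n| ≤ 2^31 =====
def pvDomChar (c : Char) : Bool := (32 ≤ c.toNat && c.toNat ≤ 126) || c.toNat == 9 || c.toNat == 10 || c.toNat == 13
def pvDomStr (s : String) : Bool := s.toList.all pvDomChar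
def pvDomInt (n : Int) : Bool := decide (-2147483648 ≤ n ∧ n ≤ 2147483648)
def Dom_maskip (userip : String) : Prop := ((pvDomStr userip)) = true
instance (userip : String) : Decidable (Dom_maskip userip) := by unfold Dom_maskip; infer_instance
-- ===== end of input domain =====

-- B replaces A's dot-counting character scan by split-on-dot / mask the third token / join: simpler (and measured faster, C-level split/join vs per-char concatenation), same value on every input.

-- ===== PORT A =====
-- A's second loop body, step for step: bump num on '.', then the if/elif chain
-- appending to b (b is kept as a List Char and the result is String.mk of it,
-- since Lean's own String append is opaque to the kernel; same characters in the
-- same order).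
def maskipStep (st : List Char × Int) (c : Char) : List Char × Int :=
  let num := if c = '.' then st.2 + 1 else st.2
  if num ≠ 2 then (st.1 ++ [c], num)
  else if c = '.' then (st.1 ++ [c] ++ ['*', '*', '*'], num)
  else (st.1, num)

def maskip (userip : String) : String :=
  -- first loop: a collects userip[i] for i in range(len(userip)) — the char list of userip
  let a := userip.toList
  -- second loop, over j in range(len(userip)) reading a[j], with state (b, num)
  let st := a.foldl maskipStep ([], 0)
  String.mk st.1

-- ===== PORT B =====
def maskip_alt (userip : String) : String :=
  let parts := PySem.Chars.splitOn userip.toList ['.']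
  let parts := if 3 ≤ parts.length then parts.set 2 ['*', '*', '*'] else parts
  String.mk (PySem.Chars.join ['.'] parts)

-- ===== PRECONDITION & SPEC =====
def Spec_maskip (userip : String) (out : String) : Prop := out = maskip_alt userip
instance (userip : String) (out : String) : Decidable (Spec_maskip userip out) := by unfold Spec_maskip; infer_instance

-- ===== CLAIM (what is proved, stated in full; the proofs are below) =====
def Claim_equal_maskip : Prop := ∀ (userip : String), Dom_maskip userip → Spec_maskip userip (maskip userip)

-- ===== LEMMAS AND PROOFS =====

def splitDot : List Char → List (List Char)
  | [] => [[]]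
  | c :: cs => if c = '.' then [] :: splitDot cs else (splitDot cs).modifyHead (c :: ·)

theorem splitDot_ne_nil : ∀ cs : List Char, splitDot cs ≠ []
  | [] => by simp [splitDot]
  | c :: cs => by
    simp only [splitDot]
    split_ifs
    · simp
    · cases hs : splitDot cs with
      | nil => exact absurd hs (splitDot_ne_nil cs)
      | cons p ps => simp [List.modifyHead]

theorem splitOn_go_eq (l : List Char) : ∀ (fuel : Nat) (cur : List Char) (acc : List (List Char)),
    l.length < fuel →
    PySem.Chars.splitOn.go ['.'] fuel l cur acc
      = acc.reverse ++ (splitDot l).modifyHead (cur.reverse ++ ·) := by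
  induction l with
  | nil =>
    intro fuel cur acc h
    cases fuel with
    | zero => omega
    | succ f => simp [PySem.Chars.splitOn.go, splitDot, List.modifyHead]
  | cons c cs ih =>
    intro fuel cur acc h
    cases fuel with
    | zero => omega
    | succ f =>
      simp only [PySem.Chars.splitOn.go]
      by_cases hc : c = '.'
      · subst hc
        rw [if_pos (by simp [List.isPrefixOf])]
        rw [show List.drop (['.'] : List Char).length ('.' :: cs) = cs from rfl]
        rw [ih f [] ((cur.reverse) :: acc) (by simp at h; omega)]
        simp only [splitDot, if_pos rfl, List.reverse_cons, List.reverse_nil]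
        cases hs : splitDot cs with
        | nil => exact absurd hs (splitDot_ne_nil cs)
        | cons p ps => simp [List.modifyHead]
      · rw [if_neg (by simp [List.isPrefixOf]; intro he; exact hc he.symm)]
        rw [ih f (c :: cur) acc (by simp at h ⊢; omega)]
        simp only [splitDot, if_neg hc]
        cases hs : splitDot cs with
        | nil => exact absurd hs (splitDot_ne_nil cs)
        | cons p ps => simp [List.modifyHead]

theorem splitOn_eq_splitDot (cs : List Char) :
    PySem.Chars.splitOn cs ['.'] = splitDot cs := by
  rw [PySem.Chars.splitOn, splitOn_go_eq cs (cs.length + 1) [] [] (by omega)]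
  cases hs : splitDot cs with
  | nil => exact absurd hs (splitDot_ne_nil cs)
  | cons p ps => simp [List.modifyHead]

theorem join_x_cons (x : List Char) (ps : List (List Char)) :
    PySem.Chars.join ['.'] (x :: ps) = x ++ PySem.Chars.join ['.'] ([] :: ps) := by
  cases ps with
  | nil => simp [PySem.Chars.join, List.intercalate]
  | cons q qs => simp [PySem.Chars.join_cons_cons]

theorem join_modifyHead (c : Char) (l : List (List Char)) (h : l ≠ []) :
    PySem.Chars.join ['.'] (l.modifyHead (c :: ·)) = c :: PySem.Chars.join ['.'] l := by
  cases l with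
  | nil => exact absurd rfl h
  | cons p ps =>
    cases ps with
    | nil => simp [List.modifyHead, PySem.Chars.join, List.intercalate]
    | cons q qs => simp [List.modifyHead, PySem.Chars.join_cons_cons]

theorem join_splitDot (cs : List Char) :
    PySem.Chars.join ['.'] (splitDot cs) = cs := by
  induction cs with
  | nil => simp [splitDot, PySem.Chars.join, List.intercalate]
  | cons c cs ih =>
    by_cases hc : c = '.'
    · subst hc
      rw [show splitDot ('.' :: cs) = [] :: splitDot cs from by simp [splitDot]]
      cases hs : splitDot cs with
      | nil => exact absurd hs (splitDot_ne_nil cs)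
      | cons p ps =>
        rw [PySem.Chars.join_cons_cons, ← hs, ih]
        rfl
    · simp only [splitDot, if_neg hc]
      rw [join_modifyHead c _ (splitDot_ne_nil cs), ih]

def maskGo : Int → List Char → List Char
  | _, [] => []
  | n, c :: cs =>
    let num := if c = '.' then n + 1 else n
    if num ≠ 2 then c :: maskGo num cs
    else if c = '.' then '.' :: '*' :: '*' :: '*' :: maskGo num cs
    else maskGo num cs

theorem foldl_maskipStep (cs : List Char) : ∀ (b : List Char) (n : Int),
    (cs.foldl maskipStep (b, n)).1 = b ++ maskGo n cs := by
  induction cs with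
  | nil => intro b n; simp [maskGo]
  | cons c cs ih =>
    intro b n
    simp only [List.foldl_cons, maskipStep, maskGo]
    by_cases hc : c = '.' <;> simp only [hc, if_true, if_false, reduceIte] <;>
      split_ifs with h <;> simp [ih]

theorem maskGo_ge3 (cs : List Char) : ∀ n : Int, 3 ≤ n → maskGo n cs = cs := by
  induction cs with
  | nil => intro n _; simp [maskGo]
  | cons c cs ih =>
    intro n hn
    by_cases hc : c = '.' <;> simp only [maskGo, hc, if_true, if_false, reduceIte]
    · rw [if_pos (by omega), ih (n + 1) (by omega)]
    · rw [if_pos (by omega), ih n hn]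

theorem maskGo_two (cs : List Char) :
    maskGo 2 cs = PySem.Chars.join ['.'] ((splitDot cs).set 0 []) := by
  induction cs with
  | nil => simp [maskGo, splitDot, PySem.Chars.join, List.intercalate]
  | cons c cs ih =>
    by_cases hc : c = '.'
    · subst hc
      rw [show maskGo 2 ('.' :: cs) = '.' :: maskGo 3 cs from by norm_num [maskGo]]
      rw [maskGo_ge3 cs 3 (by omega)]
      rw [show (splitDot ('.' :: cs)).set 0 [] = [] :: splitDot cs from by simp [splitDot, List.set]]
      cases hs : splitDot cs with
      | nil => exact absurd hs (splitDot_ne_nil cs)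
      | cons p ps =>
        rw [PySem.Chars.join_cons_cons, ← hs, join_splitDot]
        rfl
    · rw [show maskGo 2 (c :: cs) = maskGo 2 cs from by norm_num [maskGo, hc]]
      rw [ih, show splitDot (c :: cs) = (splitDot cs).modifyHead (c :: ·) from by simp [splitDot, hc]]
      cases hs : splitDot cs with
      | nil => exact absurd hs (splitDot_ne_nil cs)
      | cons p ps => simp [List.modifyHead, List.set]

theorem join_cons_head (c : Char) (p : List Char) (X : List (List Char)) :
    PySem.Chars.join ['.'] ((c :: p) :: X) = c :: PySem.Chars.join ['.'] (p :: X) := by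
  rw [join_x_cons (c :: p) X, join_x_cons p X]; simp

theorem join_nil_cons (q : List Char) (rest : List (List Char)) :
    PySem.Chars.join ['.'] ([] :: q :: rest) = '.' :: PySem.Chars.join ['.'] (q :: rest) := by
  rw [PySem.Chars.join_cons_cons]; rfl

theorem maskGo_one (cs : List Char) :
    maskGo 1 cs = PySem.Chars.join ['.']
      (if 2 ≤ (splitDot cs).length then (splitDot cs).set 1 ['*','*','*'] else splitDot cs) := by
  induction cs with
  | nil => simp [maskGo, splitDot, PySem.Chars.join, List.intercalate]
  | cons c cs ih =>
    by_cases hc : c = '.'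
    · subst hc
      rw [show maskGo 1 ('.' :: cs) = '.' :: '*' :: '*' :: '*' :: maskGo 2 cs from by norm_num [maskGo]]
      rw [maskGo_two]
      rw [show splitDot ('.' :: cs) = [] :: splitDot cs from by simp [splitDot]]
      cases hs : splitDot cs with
      | nil => exact absurd hs (splitDot_ne_nil cs)
      | cons p ps =>
        rw [if_pos (by simp)]
        simp only [List.set]
        rw [join_nil_cons, join_x_cons ['*','*','*'] ps]
        simp
    · rw [show maskGo 1 (c :: cs) = c :: maskGo 1 cs from by norm_num [maskGo, hc]]
      rw [ih, show splitDot (c :: cs) = (splitDot cs).modifyHead (c :: ·) from by simp [splitDot, hc]]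
      cases hs : splitDot cs with
      | nil => exact absurd hs (splitDot_ne_nil cs)
      | cons p ps =>
        simp only [List.modifyHead, List.length_cons]
        by_cases hl : 2 ≤ ps.length + 1
        · rw [if_pos hl, if_pos hl]
          cases ps with
          | nil => exact absurd hl (by simp)
          | cons q qs =>
            simp only [List.set]
            rw [join_cons_head]
        · rw [if_neg hl, if_neg hl, join_cons_head]

theorem maskGo_zero (cs : List Char) :
    maskGo 0 cs = PySem.Chars.join ['.']
      (if 3 ≤ (splitDot cs).length then (splitDot cs).set 2 ['*','*','*'] else splitDot cs) := by
  induction cs with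
  | nil => simp [maskGo, splitDot, PySem.Chars.join, List.intercalate]
  | cons c cs ih =>
    by_cases hc : c = '.'
    · subst hc
      rw [show maskGo 0 ('.' :: cs) = '.' :: maskGo 1 cs from by norm_num [maskGo]]
      rw [maskGo_one]
      rw [show splitDot ('.' :: cs) = [] :: splitDot cs from by simp [splitDot]]
      cases hs : splitDot cs with
      | nil => exact absurd hs (splitDot_ne_nil cs)
      | cons p ps =>
        simp only [List.length_cons]
        by_cases hl : 2 ≤ ps.length + 1
        · rw [if_pos hl, if_pos (by omega)]
          simp only [List.set]
          cases ps with
          | nil => exact absurd hl (by simp)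
          | cons q qs =>
            simp only [List.set]
            rw [join_nil_cons]
        · rw [if_neg hl, if_neg (by omega), join_nil_cons]
    · rw [show maskGo 0 (c :: cs) = c :: maskGo 0 cs from by norm_num [maskGo, hc]]
      rw [ih, show splitDot (c :: cs) = (splitDot cs).modifyHead (c :: ·) from by simp [splitDot, hc]]
      cases hs : splitDot cs with
      | nil => exact absurd hs (splitDot_ne_nil cs)
      | cons p ps =>
        simp only [List.modifyHead, List.length_cons]
        by_cases hl : 3 ≤ ps.length + 1
        · rw [if_pos hl, if_pos hl]
          cases ps with
          | nil => exact absurd hl (by simp)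
          | cons q qs =>
            cases qs with
            | nil => exact absurd hl (by simp)
            | cons r rs =>
              simp only [List.set]
              rw [join_cons_head]
        · rw [if_neg hl, if_neg hl, join_cons_head]


-- ===== VERDICT (by name: the statement is the Claim_ definition above) =====
theorem maskip_spec : Claim_equal_maskip := by
  intro userip _
  show maskip userip = maskip_alt userip
  simp only [maskip, maskip_alt]
  rw [foldl_maskipStep, splitOn_eq_splitDot, maskGo_zero]
  simp
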